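-- pv_equiv track=rewrite | github.com/JamesWo/Algorithms | topcoder/division2-2/FoxAndGo.l2.SRM590.py | maxKill
-- ===== SOURCE A (Python) =====
-- def bfs( board, row, col, size, empty ):
--     # if there is a single place to put a piece to kill the most
--     # white pieces, return size, (row, col)
--     if row < 0 or row >= len(board) or col < 0 or col >= len(board):
--         return
--     elif board[row][col] == ".":
--         empty.append( ( row, col ) )
--     elif board[row][col] in ( "x", "v" ):
--         return
--     elif board[row][col] == "o":
--         size[0] += 1
--         board[row][col] = "v" # visited
--         for r in ( row-1, row+1 ):
--                 bfs( board, r, col, size, empty )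
--         for c in ( col-1, col+1 ):
--             bfs( board, row, c, size, empty )
--     else:
--         assert False
--
-- def maxKill(board):
--     b = []
--     n = len(board)
--     for row in board:
--         new = []
--         for char in row:
--             new.append( char )
--         b.append( new )
--     # maps tuple representing a position to place a piece
--     # to the number of black pieces removed from the move.
--     positionToSizeMapping = {}
--     total = 0
--     for row in range(n):
--         for col in range(n):
--             if board[row][col] == "o":
--                 size = [0]
--                 empty = []
--                 bfs( b, row, col, size, empty )
--                 empty = list( set( empty ) )
--                 if len(empty) == 0:
--                     total += size[0]
--                 elif len(empty) == 1:
--                     if empty[0] in positionToSizeMapping: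
--                         positionToSizeMapping[ empty[0] ] += size[0]
--                     else:
--                         positionToSizeMapping[ empty[0] ] = size[0]
--     if not positionToSizeMapping:
--         return total
--     return max( positionToSizeMapping.values() ) + total
-- ===== SOURCE B (Python) =====
-- def maxKill(board):
--     # Two-phase: collect (size, liberty-set) per black component with an
--     # iterative stack flood over a shared visited set, then aggregate.
--     n = len(board)
--     total = 0
--     gains = {}
--     visited = set()
--     for r in range(n):
--         for c in range(n):
--             if board[r][c] == "o" and (r, c) not in visited:
--                 size = 0
--                 libs = set()
--                 stack = [(r, c)]
--                 while stack:
--                     i, j = stack.pop()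
--                     if i < 0 or i >= n or j < 0 or j >= n or (i, j) in visited:
--                         continue
--                     ch = board[i][j]
--                     if ch == ".":
--                         libs.add((i, j))
--                     elif ch == "o":
--                         visited.add((i, j))
--                         size += 1
--                         stack.extend([(i, j + 1), (i, j - 1), (i + 1, j), (i - 1, j)])
--                 if not libs:
--                     total += size
--                 elif len(libs) == 1:
--                     p = libs.pop()
--                     gains[p] = gains.get(p, 0) + size
--     if not gains:
--         return total
--     return total + max(gains.values())
-- ===== Notes on version B (the rewrite author's own statement) =====
-- stated objective: alternative
-- what changed: Replaces the recursive out-parameter flood fill over a mutated board copy (re-launched from every 'o' cell) with a two-phase pass: an iterative stack flood over a shared visited set yields each component's size and deduplicated liberty set once, and a plain aggregation folds these into the total and the liberty->gain dict.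
import Mathlib
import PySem

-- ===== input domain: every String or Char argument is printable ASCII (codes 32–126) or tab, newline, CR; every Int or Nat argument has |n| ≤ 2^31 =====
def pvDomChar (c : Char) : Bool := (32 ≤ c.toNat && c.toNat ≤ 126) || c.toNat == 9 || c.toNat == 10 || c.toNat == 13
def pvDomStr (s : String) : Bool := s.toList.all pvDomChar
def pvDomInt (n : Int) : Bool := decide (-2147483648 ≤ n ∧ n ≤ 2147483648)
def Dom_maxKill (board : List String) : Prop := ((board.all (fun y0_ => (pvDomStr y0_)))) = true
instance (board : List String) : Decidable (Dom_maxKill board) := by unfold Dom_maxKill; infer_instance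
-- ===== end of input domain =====

-- B replaces A's recursive, board-mutating flood fill by a two-phase visited-set/stack pass; equal results proved on Pre_ (A's non-raising inputs).

-- ===== PORT A =====
-- A's bfs: recursion threading the mutable state (board copy b, size cell, empty list).
-- fuel is only a totality guard (maxKill passes cell count + 1, more than the recursion depth ever reaches).
def bfsA : Nat → List (List Char) → Int → Int → Int → List (Int × Int) →
    List (List Char) × Int × List (Int × Int)
  | 0, b, _, _, size, empty => (b, size, empty)
  | fuel+1, b, row, col, size, empty =>
    if row < 0 ∨ (b.length : Int) ≤ row ∨ col < 0 ∨ (b.length : Int) ≤ col then (b, size, empty)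
    else
      -- in-bounds read; the ' ' default is only reached on inputs outside Pre_
      let ch := (b.getD row.toNat []).getD col.toNat ' '
      if ch = '.' then (b, size, empty ++ [(row, col)])
      else if ch = 'x' ∨ ch = 'v' then (b, size, empty)
      else if ch = 'o' then
        let b1 := b.set row.toNat ((b.getD row.toNat []).set col.toNat 'v')
        let s1 := bfsA fuel b1 (row - 1) col (size + 1) empty
        let s2 := bfsA fuel s1.1 (row + 1) col s1.2.1 s1.2.2
        let s3 := bfsA fuel s2.1 row (col - 1) s2.2.1 s2.2.2
        bfsA fuel s3.1 row (col + 1) s3.2.1 s3.2.2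
      else (b, size, empty)   -- Python: assert False (raises; excluded by Pre_)

-- body of A's nested row/col loop
def stepA (fuel : Nat) (board : List String)
    (st : List (List Char) × PySem.Dict (Int × Int) Int × Int) (row col : Int) :
    List (List Char) × PySem.Dict (Int × Int) Int × Int :=
  if ((board.getD row.toNat "").toList).getD col.toNat ' ' = 'o' then
    let r := bfsA fuel st.1 row col 0 []
    let empty := PySem.Set.ofList r.2.2      -- empty = list(set(empty))
    if empty.length = 0 then (r.1, st.2.1, st.2.2 + r.2.1)
    else if empty.length = 1 then
      let p := empty.getD 0 (0, 0)
      if st.2.1.contains p then (r.1, st.2.1.insert p (st.2.1.getD p 0 + r.2.1), st.2.2)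
      else (r.1, st.2.1.insert p r.2.1, st.2.2)
    else (r.1, st.2.1, st.2.2)
  else st

def maxKill (board : List String) : Int :=
  -- the copying double loop building b
  let b := board.foldl (fun acc row => acc ++ [row.toList.foldl (fun nr ch => nr ++ [ch]) []]) []
  let n : Int := (board.length : Int)
  let fuel := (b.foldl (fun acc r => acc + r.length) 0) + 1   -- totality guard only
  let st := (PySem.List.pyRange 0 n 1).foldl (fun st row =>
    (PySem.List.pyRange 0 n 1).foldl (fun st col => stepA fuel board st row col) st)
    (b, PySem.Dict.empty, (0 : Int))
  if st.2.1.size = 0 then st.2.2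
  else (PySem.List.max? st.2.1.values (fun x => x)).getD 0 + st.2.2

-- ===== PORT B =====
-- B's inner while loop: explicit stack, shared visited set, liberty set.
-- The Lean stack head is the Python list's end (its pop() side): Python pushes
-- [right,left,down,up] and pops from the end, so the pop order is the head order here.
-- fuel is only a totality guard (maxKill_alt passes 5*cells+5, more than the loop ever iterates).
def floodB (board : List String) (n : Int) : Nat → List (Int × Int) →
    PySem.Set (Int × Int) → Int → PySem.Set (Int × Int) →
    PySem.Set (Int × Int) × Int × PySem.Set (Int × Int)
  | 0, _, visited, size, libs => (visited, size, libs)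
  | _+1, [], visited, size, libs => (visited, size, libs)
  | fuel+1, (i, j) :: stack, visited, size, libs =>
    if i < 0 ∨ n ≤ i ∨ j < 0 ∨ n ≤ j ∨ PySem.Set.contains visited (i, j) = true then
      floodB board n fuel stack visited size libs
    else
      let ch := ((board.getD i.toNat "").toList).getD j.toNat ' '
      if ch = '.' then floodB board n fuel stack visited size (PySem.Set.add libs (i, j))
      else if ch = 'o' then
        floodB board n fuel ((i-1, j) :: (i+1, j) :: (i, j-1) :: (i, j+1) :: stack)
          (PySem.Set.add visited (i, j)) (size + 1) libs
      else floodB board n fuel stack visited size libs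

-- body of B's row/col loop
def stepB (fuel : Nat) (board : List String)
    (st : PySem.Set (Int × Int) × PySem.Dict (Int × Int) Int × Int) (r c : Int) :
    PySem.Set (Int × Int) × PySem.Dict (Int × Int) Int × Int :=
  if ((board.getD r.toNat "").toList).getD c.toNat ' ' = 'o' ∧ PySem.Set.contains st.1 (r, c) = false then
    let res := floodB board (board.length : Int) fuel [(r, c)] st.1 0 PySem.Set.empty
    if res.2.2.length = 0 then (res.1, st.2.1, st.2.2 + res.2.1)
    else if res.2.2.length = 1 then
      let p := res.2.2.getD 0 (0, 0)   -- libs.pop() of a one-element set is its element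
      (res.1, st.2.1.insert p (st.2.1.getD p 0 + res.2.1), st.2.2)
    else (res.1, st.2.1, st.2.2)
  else st

def maxKill_alt (board : List String) : Int :=
  let n : Int := (board.length : Int)
  let fuel := 5 * (board.foldl (fun acc r => acc + r.toList.length) 0) + 5  -- totality guard only
  let st := (PySem.List.pyRange 0 n 1).foldl (fun st r =>
    (PySem.List.pyRange 0 n 1).foldl (fun st c => stepB fuel board st r c) st)
    ((PySem.Set.empty : PySem.Set (Int × Int)), PySem.Dict.empty, (0 : Int))
  if st.2.1.size = 0 then st.2.2
  else st.2.2 + (PySem.List.max? st.2.1.values (fun x => x)).getD 0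

-- ===== PRECONDITION & SPEC =====
-- Pre_: exactly the inputs on which the Python A returns: every row at least as long as the
-- board is high (else the cell loop raises IndexError), and every in-bounds cell 4-adjacent to
-- an 'o' stone holds one of '.', 'x', 'o', 'v' (else bfs hits 'assert False').
def Pre_maxKill (board : List String) : Prop :=
  (∀ r ∈ board, board.length ≤ r.toList.length) ∧
  (∀ i ∈ List.range board.length, ∀ j ∈ List.range board.length,
    ((board.getD i "").toList).getD j ' ' = 'o' →
    ∀ i' ∈ List.range board.length, ∀ j' ∈ List.range board.length,
      ((i' = i ∧ (j' = j + 1 ∨ j' + 1 = j)) ∨ (j' = j ∧ (i' = i + 1 ∨ i' + 1 = i))) →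
      ((board.getD i' "").toList).getD j' ' ' ∈ (['.', 'x', 'o', 'v'] : List Char))
instance (board : List String) : Decidable (Pre_maxKill board) := by unfold Pre_maxKill; infer_instance

def pvWitness_maxKill : List String := ([".o", "oo"])

def Spec_maxKill (board : List String) (out : Int) : Prop := out = maxKill_alt board
instance (board : List String) (out : Int) : Decidable (Spec_maxKill board out) := by unfold Spec_maxKill; infer_instance

-- ===== CLAIM (what is proved, stated in full; the proofs are below) =====
def Claim_equal_maxKill : Prop := ∀ (board : List String), Dom_maxKill board → Pre_maxKill board → Spec_maxKill board (maxKill board)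

-- ===== LEMMAS AND PROOFS =====

-- row i of the original board, and its character at column j
def pvRow (board : List String) (i : Nat) : List Char := (board.getD i "").toList
def pvG (board : List String) (i j : Nat) : Char := (pvRow board i).getD j ' '

-- all (row, col) pairs of the n×n grid
def pvCells (n : Nat) : List (Nat × Nat) :=
  (List.range n).flatMap (fun i => (List.range n).map (fun j => (i, j)))

-- number of 'o' cells of the grid not yet visited (the flood measure)
def pvOLeft (board : List String) (v : PySem.Set (Int × Int)) : Nat :=
  (pvCells board.length).countP
    (fun p => decide (pvG board p.1 p.2 = 'o' ∧ ((p.1 : Int), (p.2 : Int)) ∉ v))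

-- every visited position is an in-bounds cell inside its row's characters
def pvInv (board : List String) (v : PySem.Set (Int × Int)) : Prop :=
  ∀ p ∈ v, ∃ i j : Nat, p = ((i : Int), (j : Int)) ∧ i < board.length ∧ j < board.length ∧
    j < (pvRow board i).length

-- A's mutated board copy b shows 'v' exactly at B's visited cells
def pvRel (board : List String) (b : List (List Char)) (v : PySem.Set (Int × Int)) : Prop :=
  pvInv board v ∧ b.length = board.length ∧
  (∀ i : Nat, (b.getD i []).length = (pvRow board i).length) ∧
  (∀ i j : Nat, (b.getD i []).getD j ' ' =
    if ((i : Int), (j : Int)) ∈ v then 'v' else pvG board i j)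


-- A's and B's flood results correspond: same size, B's liberty set is set(A's empty list),
-- and the mutated board still mirrors the visited set
def pvSim (board : List String) (sA : List (List Char) × Int × List (Int × Int))
    (sB : PySem.Set (Int × Int) × Int × PySem.Set (Int × Int)) : Prop :=
  pvRel board sA.1 sB.1 ∧ sA.2.1 = sB.2.1 ∧ sB.2.2 = PySem.Set.ofList sA.2.2

-- outer-loop invariant: boards correspond, dicts and totals are equal
def pvOut (board : List String) (sA : List (List Char) × PySem.Dict (Int × Int) Int × Int)
    (sB : PySem.Set (Int × Int) × PySem.Dict (Int × Int) Int × Int) : Prop :=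
  pvRel board sA.1 sB.1 ∧ sA.2.1 = sB.2.1 ∧ sA.2.2 = sB.2.2

lemma pvFloodB_nil (board : List String) (n : Int) (f : Nat) (v : PySem.Set (Int × Int))
    (s : Int) (l : PySem.Set (Int × Int)) : floodB board n f [] v s l = (v, s, l) := by
  cases f <;> rfl

lemma pvMem_cells (n i j : Nat) : (i, j) ∈ pvCells n ↔ i < n ∧ j < n := by
  simp [pvCells]

lemma pvCells_length (n : Nat) : (pvCells n).length = n * n := by
  simp [pvCells, List.length_flatMap]

lemma pvCountP_lt {α : Type} (l : List α) (p q : α → Bool) (a : α) (ha : a ∈ l)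
    (hp : p a = true) (hq : ¬ q a = true) (himp : ∀ x, q x = true → p x = true) :
    l.countP q < l.countP p := by
  induction l with
  | nil => cases ha
  | cons b t ih =>
    have hmono : t.countP q ≤ t.countP p :=
      List.countP_mono_left (fun x _ hx => himp x hx)
    rcases List.mem_cons.1 ha with rfl | ha
    · have hq' : q a = false := by rwa [Bool.not_eq_true] at hq
      simp [hp, hq']
      omega
    · have := ih ha
      simp only [List.countP_cons]
      have hqb : q b = true → p b = true := himp b
      by_cases hb : q b = true
      · simp [hb, hqb hb]; omega
      · simp [hb]; omega

lemma pvOLeft_le (board : List String) (v : PySem.Set (Int × Int)) :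
    pvOLeft board v ≤ board.length * board.length := by
  calc pvOLeft board v ≤ (pvCells board.length).length := List.countP_le_length
  _ = _ := pvCells_length board.length

lemma pvOLeft_add_le (board : List String) (v : PySem.Set (Int × Int)) (x : Int × Int) :
    pvOLeft board (PySem.Set.add v x) ≤ pvOLeft board v := by
  refine List.countP_mono_left (fun p _ hp => ?_)
  simp only [decide_eq_true_eq] at hp ⊢
  refine ⟨hp.1, fun hm => hp.2 ?_⟩
  exact (PySem.Set.mem_add v x _).2 (Or.inl hm)

lemma pvOLeft_add_lt (board : List String) (v : PySem.Set (Int × Int)) (i j : Nat)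
    (hi : i < board.length) (hj : j < board.length) (hg : pvG board i j = 'o')
    (hv : ((i : Int), (j : Int)) ∉ v) :
    pvOLeft board (PySem.Set.add v ((i : Int), (j : Int))) < pvOLeft board v := by
  refine pvCountP_lt _ _ _ (i, j) ((pvMem_cells _ _ _).2 ⟨hi, hj⟩) ?_ ?_ ?_
  · simp [hg, hv]
  · intro hq
    simp only [decide_eq_true_eq] at hq
    exact hq.2 ((PySem.Set.mem_add v _ _).2 (Or.inr rfl))
  · intro p hp
    simp only [decide_eq_true_eq] at hp ⊢
    refine ⟨hp.1, fun hm => hp.2 ?_⟩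
    exact (PySem.Set.mem_add v _ _).2 (Or.inl hm)

lemma pvOLeft_floodB_le (board : List String) :
    ∀ (f : Nat) (stack : List (Int × Int)) (v : PySem.Set (Int × Int)) (s : Int)
      (l : PySem.Set (Int × Int)),
    pvOLeft board (floodB board (board.length : Int) f stack v s l).1 ≤ pvOLeft board v := by
  intro f
  induction f with
  | zero => intro stack v s l; simp [floodB]
  | succ f ih =>
    intro stack v s l
    rcases stack with _ | ⟨⟨i, j⟩, st⟩
    · simp [floodB]
    · simp only [floodB]
      split_ifs with h1 h2 h3
      · exact ih st v s l
      · exact ih st v s _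
      · exact le_trans (ih _ _ _ _) (pvOLeft_add_le board v (i, j))
      · exact ih st v s l

lemma pvRel_mark (board : List String) (b : List (List Char)) (v : PySem.Set (Int × Int))
    (i j : Nat) (hrel : pvRel board b v) (hi : i < board.length) (hj : j < board.length)
    (hch : (b.getD i []).getD j ' ' = 'o') (hv : ((i : Int), (j : Int)) ∉ v) :
    pvRel board (b.set i ((b.getD i []).set j 'v')) (PySem.Set.add v ((i : Int), (j : Int))) := by
  obtain ⟨hinv, hlen, hrows, hpt⟩ := hrel
  have hgo : pvG board i j = 'o' := by
    have h0 := hpt i j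
    rw [hch, if_neg hv] at h0
    exact h0.symm
  have hjr : j < (pvRow board i).length := by
    by_contra hle
    push Not at hle
    rw [pvG, List.getD_eq_default _ _ hle] at hgo
    exact absurd hgo (by decide)
  have hjb : j < (b.getD i []).length := by rw [hrows i]; exact hjr
  have hib : i < b.length := by rw [hlen]; exact hi
  have hcast : ∀ (k l : Nat), (((k : Int), (l : Int)) = ((i : Int), (j : Int))) ↔ (k = i ∧ l = j) := by
    intro k l; simp [Prod.ext_iff]
  refine ⟨?_, ?_, ?_, ?_⟩
  · intro p hp
    rcases (PySem.Set.mem_add _ _ _).1 hp with hp | rfl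
    · exact hinv p hp
    · exact ⟨i, j, rfl, hi, hj, hjr⟩
  · simpa [List.length_set] using hlen
  · intro k
    by_cases hk : k = i
    · subst hk
      have hrow_eq : (b.set k ((b.getD k []).set j 'v')).getD k [] = (b.getD k []).set j 'v' := by
        simp [List.getD, hib]
      rw [hrow_eq, List.length_set]
      exact hrows k
    · have : (b.set i ((b.getD i []).set j 'v')).getD k [] = b.getD k [] := by
        simp [List.getD, (Ne.symm hk : i ≠ k)]
      rw [this]
      exact hrows k
  · intro k l
    by_cases hk : k = i
    · subst hk
      have hrow_eq : (b.set k ((b.getD k []).set j 'v')).getD k [] = (b.getD k []).set j 'v' := by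
        simp [List.getD, hib]
      rw [hrow_eq]
      by_cases hl : l = j
      · subst hl
        have hmem : ((k : Int), (l : Int)) ∈ PySem.Set.add v ((k : Int), (l : Int)) :=
          (PySem.Set.mem_add _ _ _).2 (Or.inr rfl)
        rw [if_pos hmem]
        have hjb' : l < (b[k]?.getD []).length := hjb
        simp [List.getD, hjb']
      · have hne : ¬ (k = k ∧ l = j) := fun h => hl h.2
        have hiff : (((k : Int), (l : Int)) ∈ PySem.Set.add v ((k : Int), (j : Int)))
            ↔ (((k : Int), (l : Int)) ∈ v) := by
          rw [PySem.Set.mem_add]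
          exact ⟨fun h => h.elim id (fun h => absurd ((hcast k l).1 h) hne), Or.inl⟩
        simp only [hiff]
        have : ((b.getD k []).set j 'v').getD l ' ' = (b.getD k []).getD l ' ' := by
          simp [List.getD, (Ne.symm hl : j ≠ l)]
        rw [this]
        exact hpt k l
    · have hne : ¬ (k = i ∧ l = j) := fun h => hk h.1
      have hiff : (((k : Int), (l : Int)) ∈ PySem.Set.add v ((i : Int), (j : Int)))
          ↔ (((k : Int), (l : Int)) ∈ v) := by
        rw [PySem.Set.mem_add]
        exact ⟨fun h => h.elim id (fun h => absurd ((hcast k l).1 h) hne), Or.inl⟩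
      simp only [hiff]
      have : (b.set i ((b.getD i []).set j 'v')).getD k [] = b.getD k [] := by
        simp [List.getD, (Ne.symm hk : i ≠ k)]
      rw [this]
      exact hpt k l

def pvNbrs (i j : Int) : List (Int × Int) := [(i - 1, j), (i + 1, j), (i, j - 1), (i, j + 1)]

lemma pvStep1 (board : List String) (g : Nat) (i j : Int) (rest : List (Int × Int))
    (v : PySem.Set (Int × Int)) (s : Int) (l : PySem.Set (Int × Int)) :
    floodB board (board.length : Int) (g + 1) ((i, j) :: rest) v s l =
      if i < 0 ∨ (board.length : Int) ≤ i ∨ j < 0 ∨ (board.length : Int) ≤ j ∨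
          PySem.Set.contains v (i, j) = true then
        floodB board (board.length : Int) g rest v s l
      else if pvG board i.toNat j.toNat = '.' then
        floodB board (board.length : Int) g rest v s (PySem.Set.add l (i, j))
      else if pvG board i.toNat j.toNat = 'o' then
        floodB board (board.length : Int) g (pvNbrs i j ++ rest) (PySem.Set.add v (i, j)) (s + 1) l
      else floodB board (board.length : Int) g rest v s l := by
  simp only [floodB, pvNbrs, pvG, pvRow, List.cons_append, List.nil_append]

lemma pvFuelIrrel (board : List String) :
    ∀ (f f' : Nat) (stack : List (Int × Int)) (v : PySem.Set (Int × Int)) (s : Int)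
      (l : PySem.Set (Int × Int)),
    5 * pvOLeft board v + stack.length ≤ f → 5 * pvOLeft board v + stack.length ≤ f' →
    floodB board (board.length : Int) f stack v s l
      = floodB board (board.length : Int) f' stack v s l := by
  intro f
  induction f with
  | zero =>
    intro f' stack v s l h h'
    have hst : stack = [] := by
      cases stack with
      | nil => rfl
      | cons a t => exfalso; simp only [List.length_cons] at h; omega
    subst hst
    rw [pvFloodB_nil, pvFloodB_nil]
  | succ f ih =>
    intro f' stack v s l h h'
    rcases stack with _ | ⟨⟨i, j⟩, st⟩
    · rw [pvFloodB_nil, pvFloodB_nil]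
    · obtain ⟨f'', rfl⟩ : ∃ k, f' = k + 1 :=
        ⟨f' - 1, by simp only [List.length_cons] at h'; omega⟩
      rw [pvStep1, pvStep1]
      simp only [List.length_cons] at h h'
      by_cases h1 : i < 0 ∨ (board.length : Int) ≤ i ∨ j < 0 ∨ (board.length : Int) ≤ j ∨
          PySem.Set.contains v (i, j) = true
      · rw [if_pos h1, if_pos h1]
        exact ih f'' st v s l (by omega) (by omega)
      · rw [if_neg h1, if_neg h1]
        by_cases h2 : pvG board i.toNat j.toNat = '.'
        · rw [if_pos h2, if_pos h2]
          exact ih f'' st v s _ (by omega) (by omega)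
        · rw [if_neg h2, if_neg h2]
          by_cases h3 : pvG board i.toNat j.toNat = 'o'
          · rw [if_pos h3, if_pos h3]
            push Not at h1
            obtain ⟨hi0, hiU, hj0, hjU, hcv⟩ := h1
            have hv : ((i.toNat : Int), (j.toNat : Int)) ∉ v := by
              rw [Int.toNat_of_nonneg (by omega), Int.toNat_of_nonneg (by omega)]
              intro hm
              exact hcv ((PySem.Set.contains_iff _ _).2 hm)
            have hlt := pvOLeft_add_lt board v i.toNat j.toNat (by omega) (by omega) h3 hv
            rw [Int.toNat_of_nonneg (by omega), Int.toNat_of_nonneg (by omega)] at hlt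
            refine ih f'' _ _ _ _ ?_ ?_ <;>
              (simp only [pvNbrs, List.cons_append, List.nil_append, List.length_cons]; omega)
          · rw [if_neg h3, if_neg h3]
            exact ih f'' st v s l (by omega) (by omega)

lemma pvAppend (board : List String) (ys : List (Int × Int)) :
    ∀ (f f1 f2 : Nat) (xs : List (Int × Int)) (v : PySem.Set (Int × Int)) (s : Int)
      (l : PySem.Set (Int × Int)),
    5 * pvOLeft board v + (xs ++ ys).length ≤ f →
    5 * pvOLeft board v + xs.length ≤ f1 →
    5 * pvOLeft board (floodB board (board.length : Int) f1 xs v s l).1 + ys.length ≤ f2 →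
    floodB board (board.length : Int) f (xs ++ ys) v s l
      = floodB board (board.length : Int) f2 ys
          (floodB board (board.length : Int) f1 xs v s l).1
          (floodB board (board.length : Int) f1 xs v s l).2.1
          (floodB board (board.length : Int) f1 xs v s l).2.2 := by
  intro f
  induction f with
  | zero =>
    intro f1 f2 xs v s l h h1 h2
    simp only [List.length_append] at h
    have hx : xs = [] := List.length_eq_zero_iff.1 (by omega)
    have hy : ys = [] := List.length_eq_zero_iff.1 (by omega)
    subst hx; subst hy
    simp only [List.nil_append, pvFloodB_nil]
  | succ f ih =>
    intro f1 f2 xs v s l h h1 h2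
    rcases xs with _ | ⟨⟨i, j⟩, xs'⟩
    · simp only [List.nil_append] at h ⊢
      rw [pvFloodB_nil] at h2 ⊢
      exact pvFuelIrrel board (f + 1) f2 ys v s l (by omega) h2
    · obtain ⟨f1', rfl⟩ : ∃ k, f1 = k + 1 :=
        ⟨f1 - 1, by simp only [List.length_cons] at h1; omega⟩
      simp only [List.cons_append] at h h2 ⊢
      rw [pvStep1] at h2 ⊢
      rw [pvStep1]
      simp only [List.length_cons, List.length_append] at h h1
      by_cases hg : i < 0 ∨ (board.length : Int) ≤ i ∨ j < 0 ∨ (board.length : Int) ≤ j ∨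
          PySem.Set.contains v (i, j) = true
      · rw [if_pos hg] at h2 ⊢
        rw [if_pos hg]
        exact ih f1' f2 xs' v s l (by simp only [List.length_append]; omega) (by omega) h2
      · rw [if_neg hg] at h2 ⊢
        rw [if_neg hg]
        by_cases hdot : pvG board i.toNat j.toNat = '.'
        · rw [if_pos hdot] at h2 ⊢
          rw [if_pos hdot]
          exact ih f1' f2 xs' v s _ (by simp only [List.length_append]; omega) (by omega) h2
        · rw [if_neg hdot] at h2 ⊢
          rw [if_neg hdot]
          by_cases ho : pvG board i.toNat j.toNat = 'o'
          · rw [if_pos ho] at h2 ⊢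
            rw [if_pos ho]
            push Not at hg
            obtain ⟨hi0, hiU, hj0, hjU, hcv⟩ := hg
            have hv : ((i.toNat : Int), (j.toNat : Int)) ∉ v := by
              rw [Int.toNat_of_nonneg (by omega), Int.toNat_of_nonneg (by omega)]
              intro hm
              exact hcv ((PySem.Set.contains_iff _ _).2 hm)
            have hlt := pvOLeft_add_lt board v i.toNat j.toNat (by omega) (by omega) ho hv
            rw [Int.toNat_of_nonneg (by omega), Int.toNat_of_nonneg (by omega)] at hlt
            rw [← List.append_assoc]
            refine ih f1' f2 (pvNbrs i j ++ xs') _ _ _ ?_ ?_ h2 <;>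
              (simp only [pvNbrs, List.length_append, List.length_cons, List.length_nil]; omega)
          · rw [if_neg ho] at h2 ⊢
            rw [if_neg ho]
            exact ih f1' f2 xs' v s l (by simp only [List.length_append]; omega) (by omega) h2

lemma pvBisim (board : List String) :
    ∀ (fa : Nat), ∀ (fb : Nat) (row col size : Int) (b : List (List Char))
      (v : PySem.Set (Int × Int)) (empty : List (Int × Int)),
    pvRel board b v → pvOLeft board v < fa → 5 * pvOLeft board v + 1 ≤ fb →
    pvSim board (bfsA fa b row col size empty)
      (floodB board (board.length : Int) fb [(row, col)] v size (PySem.Set.ofList empty)) := by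
  intro fa
  induction fa with
  | zero => intro fb row col size b v empty hrel hfa hfb; omega
  | succ fa ih =>
    intro fb row col size b v empty hrel hfa hfb
    obtain ⟨hinv, hlen, hrows, hpt⟩ := hrel
    obtain ⟨fb', rfl⟩ : ∃ k, fb = k + 1 := ⟨fb - 1, by omega⟩
    rw [pvStep1]
    simp only [bfsA]
    by_cases hb : row < 0 ∨ (b.length : Int) ≤ row ∨ col < 0 ∨ (b.length : Int) ≤ col
    · have hg : row < 0 ∨ (board.length : Int) ≤ row ∨ col < 0 ∨ (board.length : Int) ≤ col ∨
          PySem.Set.contains v (row, col) = true := by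
        rw [hlen] at hb
        tauto
      rw [if_pos hb, if_pos hg, pvFloodB_nil]
      exact ⟨⟨hinv, hlen, hrows, hpt⟩, rfl, rfl⟩
    · push Not at hb
      obtain ⟨hr0', hrU, hc0', hcU⟩ := hb
      have hr0 : 0 ≤ row := by omega
      have hc0 : 0 ≤ col := by omega
      rw [if_neg (by omega : ¬ (row < 0 ∨ (b.length : Int) ≤ row ∨ col < 0 ∨ (b.length : Int) ≤ col))]
      have hpair : (((row.toNat : Nat) : Int), ((col.toNat : Nat) : Int)) = (row, col) := by
        rw [Int.toNat_of_nonneg hr0, Int.toNat_of_nonneg hc0]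
      have hi : row.toNat < board.length := by omega
      have hj : col.toNat < board.length := by omega
      have hptc := hpt row.toNat col.toNat
      rw [hpair] at hptc
      by_cases hv : (row, col) ∈ v
      · have hchv : (b.getD row.toNat []).getD col.toNat ' ' = 'v' := by
          rw [hptc, if_pos hv]
        have hgB : row < 0 ∨ (board.length : Int) ≤ row ∨ col < 0 ∨ (board.length : Int) ≤ col ∨
            PySem.Set.contains v (row, col) = true := by
          exact Or.inr (Or.inr (Or.inr (Or.inr ((PySem.Set.contains_iff _ _).2 hv))))
        rw [if_pos hgB, pvFloodB_nil]
        rw [if_neg (by rw [hchv]; decide), if_pos (by rw [hchv]; decide)]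
        exact ⟨⟨hinv, hlen, hrows, hpt⟩, rfl, rfl⟩
      · have hgB : ¬ (row < 0 ∨ (board.length : Int) ≤ row ∨ col < 0 ∨ (board.length : Int) ≤ col ∨
            PySem.Set.contains v (row, col) = true) := by
          push Not
          refine ⟨by omega, by omega, by omega, by omega, ?_⟩
          intro hc
          exact hv ((PySem.Set.contains_iff _ _).1 hc)
        rw [if_neg hgB]
        have hch : (b.getD row.toNat []).getD col.toNat ' ' = pvG board row.toNat col.toNat := by
          rw [hptc, if_neg hv]
        by_cases hdot : pvG board row.toNat col.toNat = '.'
        · rw [if_pos (by rw [hch]; exact hdot), if_pos hdot, pvFloodB_nil]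
          refine ⟨⟨hinv, hlen, hrows, hpt⟩, rfl, ?_⟩
          simp [PySem.Set.ofList_eq_foldl]
        · rw [if_neg (by rw [hch]; exact hdot), if_neg hdot]
          by_cases ho : pvG board row.toNat col.toNat = 'o'
          · rw [if_neg (by rw [hch, ho]; decide), if_pos (by rw [hch]; exact ho), if_pos ho]
            -- the marking
            have hvc : (((row.toNat : Nat) : Int), ((col.toNat : Nat) : Int)) ∉ v := by
              rw [hpair]; exact hv
            have hrel1 := pvRel_mark board b v row.toNat col.toNat ⟨hinv, hlen, hrows, hpt⟩ hi hj
              (by rw [hch]; exact ho) hvc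
            rw [hpair] at hrel1
            have hlt1 := pvOLeft_add_lt board v row.toNat col.toNat hi hj ho hvc
            rw [hpair] at hlt1
            -- A-side chain
            set b1 := b.set row.toNat ((b.getD row.toNat []).set col.toNat 'v') with hb1
            set v1 := PySem.Set.add v (row, col) with hv1
            set L := PySem.Set.ofList empty with hL
            set s1 := bfsA fa b1 (row - 1) col (size + 1) empty with hs1
            have h1 : pvSim board s1
                (floodB board (board.length : Int) (5 * pvOLeft board v1 + 1)
                  [(row - 1, col)] v1 (size + 1) L) :=
              ih _ (row - 1) col (size + 1) b1 v1 empty hrel1 (by omega) (by omega)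
            set m1 := floodB board (board.length : Int) (5 * pvOLeft board v1 + 1)
              [(row - 1, col)] v1 (size + 1) L with hm1
            have hmono1 : pvOLeft board m1.1 ≤ pvOLeft board v1 := pvOLeft_floodB_le board _ _ _ _ _
            set s2 := bfsA fa s1.1 (row + 1) col s1.2.1 s1.2.2 with hs2
            have h2 : pvSim board s2
                (floodB board (board.length : Int) (5 * pvOLeft board m1.1 + 1)
                  [(row + 1, col)] m1.1 s1.2.1 (PySem.Set.ofList s1.2.2)) :=
              ih _ (row + 1) col s1.2.1 s1.1 m1.1 s1.2.2 h1.1 (by omega) (by omega)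
            set m2 := floodB board (board.length : Int) (5 * pvOLeft board m1.1 + 1)
              [(row + 1, col)] m1.1 s1.2.1 (PySem.Set.ofList s1.2.2) with hm2
            have hmono2 : pvOLeft board m2.1 ≤ pvOLeft board m1.1 := pvOLeft_floodB_le board _ _ _ _ _
            set s3 := bfsA fa s2.1 row (col - 1) s2.2.1 s2.2.2 with hs3
            have h3 : pvSim board s3
                (floodB board (board.length : Int) (5 * pvOLeft board m2.1 + 1)
                  [(row, col - 1)] m2.1 s2.2.1 (PySem.Set.ofList s2.2.2)) :=
              ih _ row (col - 1) s2.2.1 s2.1 m2.1 s2.2.2 h2.1 (by omega) (by omega)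
            set m3 := floodB board (board.length : Int) (5 * pvOLeft board m2.1 + 1)
              [(row, col - 1)] m2.1 s2.2.1 (PySem.Set.ofList s2.2.2) with hm3
            have hmono3 : pvOLeft board m3.1 ≤ pvOLeft board m2.1 := pvOLeft_floodB_le board _ _ _ _ _
            have h4 : pvSim board (bfsA fa s3.1 row (col + 1) s3.2.1 s3.2.2)
                (floodB board (board.length : Int) (5 * pvOLeft board m3.1 + 1)
                  [(row, col + 1)] m3.1 s3.2.1 (PySem.Set.ofList s3.2.2)) :=
              ih _ row (col + 1) s3.2.1 s3.1 m3.1 s3.2.2 h3.1 (by omega) (by omega)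
            -- B-side: split the 4-neighbour stack into the four singleton runs
            have hB1 : floodB board (board.length : Int) fb'
                ([(row - 1, col)] ++ [(row + 1, col), (row, col - 1), (row, col + 1)]) v1 (size + 1) L
                = floodB board (board.length : Int) (5 * pvOLeft board m1.1 + 3)
                    [(row + 1, col), (row, col - 1), (row, col + 1)] m1.1 m1.2.1 m1.2.2 := by
              refine pvAppend board _ fb' (5 * pvOLeft board v1 + 1) (5 * pvOLeft board m1.1 + 3)
                [(row - 1, col)] v1 (size + 1) L ?_ ?_ ?_
              · simp only [List.length_append, List.length_cons, List.length_nil]; omega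
              · simp only [List.length_cons, List.length_nil]; omega
              · rw [← hm1]; simp only [List.length_cons, List.length_nil]; omega
            rw [← h1.2.1, h1.2.2] at hB1
            have hB2 : floodB board (board.length : Int) (5 * pvOLeft board m1.1 + 3)
                ([(row + 1, col)] ++ [(row, col - 1), (row, col + 1)]) m1.1 s1.2.1 (PySem.Set.ofList s1.2.2)
                = floodB board (board.length : Int) (5 * pvOLeft board m2.1 + 2)
                    [(row, col - 1), (row, col + 1)] m2.1 m2.2.1 m2.2.2 := by
              refine pvAppend board _ _ (5 * pvOLeft board m1.1 + 1) (5 * pvOLeft board m2.1 + 2)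
                [(row + 1, col)] m1.1 s1.2.1 (PySem.Set.ofList s1.2.2) ?_ ?_ ?_
              · simp only [List.length_append, List.length_cons, List.length_nil]; omega
              · simp only [List.length_cons, List.length_nil]; omega
              · rw [← hm2]; simp only [List.length_cons, List.length_nil]; omega
            rw [← h2.2.1, h2.2.2] at hB2
            have hB3 : floodB board (board.length : Int) (5 * pvOLeft board m2.1 + 2)
                ([(row, col - 1)] ++ [(row, col + 1)]) m2.1 s2.2.1 (PySem.Set.ofList s2.2.2)
                = floodB board (board.length : Int) (5 * pvOLeft board m3.1 + 1)
                    [(row, col + 1)] m3.1 m3.2.1 m3.2.2 := by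
              refine pvAppend board _ _ (5 * pvOLeft board m2.1 + 1) (5 * pvOLeft board m3.1 + 1)
                [(row, col - 1)] m2.1 s2.2.1 (PySem.Set.ofList s2.2.2) ?_ ?_ ?_
              · simp only [List.length_append, List.length_cons, List.length_nil]; omega
              · simp only [List.length_cons, List.length_nil]; omega
              · rw [← hm3]; simp only [List.length_cons, List.length_nil]; omega
            rw [← h3.2.1, h3.2.2] at hB3
            simp only [List.append_nil, pvNbrs] at *
            simp only [List.cons_append, List.nil_append] at hB1 hB2 hB3
            rw [hB1, hB2, hB3]
            exact h4
          · -- any other character: A returns its state unchanged (blocker), B skips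
            rw [if_neg ho, pvFloodB_nil]
            by_cases hxv : ((b.getD row.toNat []).getD col.toNat ' ' = 'x' ∨
                (b.getD row.toNat []).getD col.toNat ' ' = 'v')
            · rw [if_pos hxv]
              exact ⟨⟨hinv, hlen, hrows, hpt⟩, rfl, rfl⟩
            · rw [if_neg hxv, if_neg (by rw [hch]; exact ho)]
              exact ⟨⟨hinv, hlen, hrows, hpt⟩, rfl, rfl⟩

lemma pvFoldlRel {α β γ : Type} (R : α → β → Prop) (f : α → γ → α) (g : β → γ → β) :
    ∀ (l : List γ) (a : α) (b : β), R a b →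
    (∀ a b x, x ∈ l → R a b → R (f a x) (g b x)) → R (l.foldl f a) (l.foldl g b) := by
  intro l
  induction l with
  | nil => intro a b h _; exact h
  | cons x t ih =>
    intro a b h hstep
    exact ih _ _ (hstep a b x (by simp) h)
      (fun a b y hy => hstep a b y (by simp [hy]))

lemma pvStep (board : List String) (fuelA fuelB : Nat)
    (hA : board.length * board.length < fuelA)
    (hB : 5 * (board.length * board.length) + 1 ≤ fuelB)
    (sA : List (List Char) × PySem.Dict (Int × Int) Int × Int)
    (sB : PySem.Set (Int × Int) × PySem.Dict (Int × Int) Int × Int) (row col : Int)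
    (hrow : 0 ≤ row ∧ row < (board.length : Int)) (hcol : 0 ≤ col ∧ col < (board.length : Int))
    (h : pvOut board sA sB) :
    pvOut board (stepA fuelA board sA row col) (stepB fuelB board sB row col) := by
  obtain ⟨hrel, hdict, htot⟩ := h
  simp only [stepA, stepB]
  by_cases hgo : ((board.getD row.toNat "").toList).getD col.toNat ' ' = 'o'
  · rw [if_pos hgo]
    by_cases hvis : PySem.Set.contains sB.1 (row, col) = true
    · -- already-visited stone: A's bfs is a no-op (it sees 'v'), B skips the cell
      rw [if_neg (show ¬ (((board.getD row.toNat "").toList).getD col.toNat ' ' = 'o' ∧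
        PySem.Set.contains sB.1 (row, col) = false) from
        fun hcontra => by rw [hcontra.2] at hvis; exact absurd hvis (by decide))]
      obtain ⟨fA', rfl⟩ : ∃ k, fuelA = k + 1 := ⟨fuelA - 1, by omega⟩
      obtain ⟨hinv, hlen, hrows, hpt⟩ := hrel
      have hmem : (row, col) ∈ sB.1 := (PySem.Set.contains_iff _ _).1 hvis
      have hpair : (((row.toNat : Nat) : Int), ((col.toNat : Nat) : Int)) = (row, col) := by
        rw [Int.toNat_of_nonneg hrow.1, Int.toNat_of_nonneg hcol.1]
      have hchv : (sA.1.getD row.toNat []).getD col.toNat ' ' = 'v' := by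
        have h0 := hpt row.toNat col.toNat
        rw [hpair, if_pos hmem] at h0
        exact h0
      have hr : bfsA (fA' + 1) sA.1 row col 0 [] = (sA.1, 0, []) := by
        simp only [bfsA]
        rw [if_neg (by rw [hlen]; omega :
          ¬ (row < 0 ∨ (sA.1.length : Int) ≤ row ∨ col < 0 ∨ (sA.1.length : Int) ≤ col))]
        rw [if_neg (by rw [hchv]; decide), if_pos (by rw [hchv]; decide)]
      rw [hr]
      simp only [PySem.Set.ofList_eq_foldl, List.foldl_nil, List.length_nil, reduceIte]
      refine ⟨⟨hinv, hlen, hrows, hpt⟩, hdict, ?_⟩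
      rw [add_zero]
      exact htot
    · -- fresh stone: run the bisimulation
      have hvis' : PySem.Set.contains sB.1 (row, col) = false := by
        cases hc : PySem.Set.contains sB.1 (row, col)
        · rfl
        · exact absurd hc hvis
      rw [if_pos (show ((board.getD row.toNat "").toList).getD col.toNat ' ' = 'o' ∧
        PySem.Set.contains sB.1 (row, col) = false from ⟨hgo, hvis'⟩)]
      have hle : pvOLeft board sB.1 ≤ board.length * board.length := pvOLeft_le board sB.1
      have hsim := pvBisim board fuelA fuelB row col 0 sA.1 sB.1 [] hrel (by omega) (by omega)
      have hempty : PySem.Set.ofList ([] : List (Int × Int)) = (PySem.Set.empty : PySem.Set (Int × Int)) := rfl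
      rw [hempty] at hsim
      obtain ⟨hrel', hsz, hlib⟩ := hsim
      rw [hlib]
      by_cases h0 : (PySem.Set.ofList (bfsA fuelA sA.1 row col 0 []).2.2).length = 0
      · rw [if_pos h0, if_pos h0]
        exact ⟨hrel', hdict, by rw [htot, hsz]⟩
      · rw [if_neg h0, if_neg h0]
        by_cases h1 : (PySem.Set.ofList (bfsA fuelA sA.1 row col 0 []).2.2).length = 1
        · rw [if_pos h1, if_pos h1]
          by_cases hc : sA.2.1.contains ((PySem.Set.ofList (bfsA fuelA sA.1 row col 0 []).2.2).getD 0 (0, 0)) = true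
          · rw [if_pos hc]
            exact ⟨hrel', by rw [hdict, hsz], htot⟩
          · rw [if_neg hc]
            refine ⟨hrel', ?_, htot⟩
            have hc' : sB.2.1.contains ((PySem.Set.ofList (bfsA fuelA sA.1 row col 0 []).2.2).getD 0 (0, 0)) = false := by
              rw [← hdict]
              cases hcc : sA.2.1.contains ((PySem.Set.ofList (bfsA fuelA sA.1 row col 0 []).2.2).getD 0 (0, 0))
              · rfl
              · exact absurd hcc hc
            rw [PySem.Dict.getD_of_not_contains _ _ hc', zero_add, hdict, hsz]
        · rw [if_neg h1, if_neg h1]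
          exact ⟨hrel', hdict, htot⟩
  · rw [if_neg hgo, if_neg (fun hcontra => hgo hcontra.1)]
    exact ⟨hrel, hdict, htot⟩

lemma pvMapGetD (board : List String) (i : Nat) :
    (board.map (fun s => s.toList)).getD i [] = (board.getD i "").toList := by
  simp only [List.getD, List.getElem?_map]
  cases h : board[i]? <;> simp

lemma pvSumGe (n : Nat) : ∀ (l : List String), (∀ r ∈ l, n ≤ r.toList.length) →
    n * l.length ≤ (l.map (fun r => r.toList.length)).sum := by
  intro l
  induction l with
  | nil => intro _; simp
  | cons r t ih =>
    intro h
    have h1 := h r (List.mem_cons_self ..)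
    have h2 := ih (fun x hx => h x (List.mem_cons_of_mem _ hx))
    simp only [List.map_cons, List.sum_cons, List.length_cons, Nat.mul_succ]
    omega

theorem maxKill_spec : Claim_equal_maxKill := by
  intro board _ hpre
  unfold Spec_maxKill
  simp only [maxKill, maxKill_alt]
  have hcopy : board.foldl (fun acc row => acc ++ [row.toList.foldl (fun nr ch => nr ++ [ch]) []])
      ([] : List (List Char)) = board.map (fun r => r.toList) := by
    rw [PySem.List.foldl_append_singleton_eq_map, List.nil_append]
    exact List.map_congr_left
      (fun r _ => by rw [PySem.List.foldl_append_singleton_eq_self, List.nil_append])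
  rw [hcopy]
  have hsumA : (board.map (fun r => r.toList)).foldl (fun acc r => acc + r.length) 0
      = (board.map (fun r => r.toList.length)).sum := by
    rw [PySem.List.foldl_add_nat]
    simp [List.map_map, Function.comp_def]
  have hsumB : board.foldl (fun acc r => acc + r.toList.length) 0
      = (board.map (fun r => r.toList.length)).sum := by
    rw [PySem.List.foldl_add_nat]
    simp
  rw [hsumA, hsumB]
  have hS := pvSumGe board.length board hpre.1
  have hmain : pvOut board
      ((PySem.List.pyRange 0 (board.length : Int) 1).foldl (fun st row =>
        (PySem.List.pyRange 0 (board.length : Int) 1).foldl (fun st col =>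
          stepA ((board.map (fun r => r.toList.length)).sum + 1) board st row col) st)
        (board.map (fun r => r.toList), PySem.Dict.empty, (0 : Int)))
      ((PySem.List.pyRange 0 (board.length : Int) 1).foldl (fun st r =>
        (PySem.List.pyRange 0 (board.length : Int) 1).foldl (fun st c =>
          stepB (5 * (board.map (fun r => r.toList.length)).sum + 5) board st r c) st)
        ((PySem.Set.empty : PySem.Set (Int × Int)), PySem.Dict.empty, (0 : Int))) := by
    refine pvFoldlRel (pvOut board) _ _ _ _ _ ⟨⟨?_, ?_, ?_, ?_⟩, rfl, rfl⟩ ?_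
    · intro p hp
      simp [PySem.Set.empty] at hp
    · simp
    · intro i
      rw [pvMapGetD]
      rfl
    · intro i j
      rw [pvMapGetD, if_neg (by simp [PySem.Set.empty])]
      rfl
    · intro a b x hx hR
      refine pvFoldlRel (pvOut board) _ _ _ _ _ hR ?_
      intro a b y hy hR2
      have hx' := (PySem.List.mem_pyRange_one).1 hx
      have hy' := (PySem.List.mem_pyRange_one).1 hy
      exact pvStep board _ _ (by omega) (by omega) a b x y hx' hy' hR2
  obtain ⟨_, hdict, htot⟩ := hmain
  rw [hdict, htot]
  split
  · rfl
  · exact Int.add_comm _ _
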